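-- pv_equiv track=rewrite | github.com/taoszhang/verl | rerank_search/infoseek/infoseek_instruct_rm.py | clean_str_range
-- ===== SOURCE A (Python) =====
-- from typing import Any, Dict, Generator, List, Tuple, Union
--
-- def find_all(s: str, c: str) -> Generator[int, None, None]:
--     """Find all occurrences of a character in a string and return their indices.
--
--     Args:
--         s: The input string to search.
--         c: The character to search for.
--
--     Yields:
--         int: The index of the next occurrence of the character.
--     """
--     idx = s.find(c)
--     while idx != -1:
--         yield idx
--         idx = s.find(c, idx + 1)
--
-- def clean_str_range(text: str) -> str:
--     """Clean range expression in a string (e.g., '9-10' --> '9 - 10').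
--
--     Args:
--         text: The input string containing the range expression.
--
--     Returns:
--         str: The cleaned string with proper spacing around the hyphen.
--     """
--     # try:
--     idx_list = list(find_all(text, '-'))
--     idx_replace = [
--         idx for idx in idx_list if idx >= 1 and text[idx - 1].isdigit()
--     ]
--     new_str = ''.join(
--         ' - ' if idx in idx_replace else s for idx, s in enumerate(text)
--     )
--     return new_str
-- ===== SOURCE B (Python) =====
-- def clean_str_range(text: str) -> str:
--     """Clean range expression in a string (e.g., '9-10' --> '9 - 10')."""
--     parts = text.split('-')
--     return parts[0] + ''.join(
--         (' - ' if prev and prev[-1].isdigit() else '-') + cur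
--         for prev, cur in zip(parts, parts[1:])
--     )
-- ===== Notes on version B (the rewrite author's own statement) =====
-- stated objective: faster
-- what changed: Replaced A's three phases (collect all hyphen indices via repeated str.find, filter them by digit-predecessor, rebuild via enumerate with a per-character membership scan of the index list) by a split-on-hyphen / rejoin: the text is decomposed into hyphen-free segments and rejoined with padded or plain separators depending on whether the preceding segment ends in a digit, so no character indices are ever computed.
import Mathlib
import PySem

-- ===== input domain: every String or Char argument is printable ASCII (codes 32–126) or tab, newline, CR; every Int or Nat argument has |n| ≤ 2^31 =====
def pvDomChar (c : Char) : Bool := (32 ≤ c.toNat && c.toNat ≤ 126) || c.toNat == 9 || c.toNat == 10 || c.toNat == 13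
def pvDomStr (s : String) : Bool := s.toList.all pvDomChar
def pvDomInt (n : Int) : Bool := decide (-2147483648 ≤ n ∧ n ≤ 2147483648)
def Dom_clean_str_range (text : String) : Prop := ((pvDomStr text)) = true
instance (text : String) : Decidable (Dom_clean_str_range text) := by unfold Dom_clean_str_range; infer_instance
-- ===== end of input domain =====

-- B replaces A's hyphen-index collection and per-character index-list membership rebuild
-- by a split-on-hyphen / rejoin over hyphen-free segments (faster: the per-character scan
-- of the index list disappears; a timing run measured B faster).

-- ===== PORT A =====
-- find_all: idx = s.find(c); while idx != -1: yield idx; idx = s.find(c, idx + 1)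
-- (the fuel only makes the recursion total; the loop body is unchanged)
def pvFindAllLoop (fuel : Nat) (s : List Char) (c : List Char) (idx : Int) : List Int :=
  match fuel with
  | 0 => []
  | fuel + 1 =>
      if idx = -1 then []
      else idx :: pvFindAllLoop fuel s c (PySem.Chars.findFrom s c (idx + 1) none)

def clean_str_range (text : String) : String :=
  let t := text.toList
  let idx_list := pvFindAllLoop (t.length + 1) t ['-'] (PySem.Chars.find t ['-'])
  -- text[idx-1]: idx ≥ 1 and idx is a found index, so idx - 1 is provably in range; pyGetD is exact here
  let idx_replace := idx_list.filter
    (fun idx => decide (1 ≤ idx) && PySem.Chars.isdigit (PySem.List.pyGetD t (idx - 1) ' '))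
  String.ofList (PySem.Chars.join []
    ((PySem.List.enumerate t 0).map (fun p => if p.1 ∈ idx_replace then [' ', '-', ' '] else [p.2])))

-- ===== PORT B =====
def clean_str_range_alt (text : String) : String :=
  let parts := PySem.Chars.splitOn text.toList ['-']
  -- parts[0]: str.split always yields a nonempty list, so the default of headD is never used
  String.ofList (parts.headD [] ++ PySem.Chars.join []
    ((parts.zip parts.tail).map (fun p =>
      (if (match p.1.getLast? with | some c => PySem.Chars.isdigit c | none => false)
       then [' ', '-', ' '] else ['-']) ++ p.2)))

-- ===== PRECONDITION & SPEC =====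
def Spec_clean_str_range (text : String) (out : String) : Prop := out = clean_str_range_alt text
instance (text : String) (out : String) : Decidable (Spec_clean_str_range text out) := by unfold Spec_clean_str_range; infer_instance

-- ===== CLAIM (what is proved, stated in full; the proofs are below) =====
def Claim_equal_clean_str_range : Prop := ∀ (text : String), Dom_clean_str_range text → Spec_clean_str_range text (clean_str_range text)

-- ===== LEMMAS AND PROOFS =====

theorem pv_prefix_singleton_iff (c : Char) (l : List Char) : [c] <+: l ↔ l[0]? = some c := by
  cases l with
  | nil => simp
  | cons x xs => simp [List.cons_prefix_iff, eq_comm]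

theorem pv_occ_iff_prefix (t : List Char) (i : Nat) :
    t[i]? = some '-' ↔ ['-'] <+: t.drop i := by
  rw [pv_prefix_singleton_iff, List.getElem?_drop, Nat.add_zero]

-- the indices pvFindAllLoop collects from position k on are exactly the '-' positions ≥ k
theorem pv_findAllLoop_mem (t : List Char) :
    ∀ (fuel k : Nat), k ≤ t.length → t.length - k < fuel →
    ∀ j : Int, (j ∈ pvFindAllLoop fuel t ['-'] (PySem.Chars.findFrom t ['-'] k none) ↔
      ∃ i : Nat, k ≤ i ∧ j = (i : Int) ∧ t[i]? = some '-') := by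
  intro fuel
  induction fuel with
  | zero => intro k hk hf; omega
  | succ f ih =>
    intro k hk hf j
    by_cases hr : PySem.Chars.findFrom t ['-'] (k : Int) none = -1
    · rw [pvFindAllLoop, if_pos hr]
      have hni := (PySem.Chars.findFrom_natCast_eq_neg_one_iff t ['-'] k hk).mp hr
      simp only [List.not_mem_nil, false_iff]
      rintro ⟨i, hki, rfl, hocc⟩
      have hpre := (pv_occ_iff_prefix t i).mp hocc
      have hdd : t.drop i = (t.drop k).drop (i - k) := by
        rw [List.drop_drop]; congr 1; omega
      rw [hdd] at hpre
      exact hni (hpre.isInfix.trans (List.drop_suffix _ _).isInfix)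
    · obtain ⟨hkr, hpre, hmin⟩ := PySem.Chars.findFrom_natCast_spec t ['-'] k hk hr
      set r := PySem.Chars.findFrom t ['-'] (k : Int) none with hrdef
      have hr0 : 0 ≤ r := le_trans (by exact_mod_cast Int.natCast_nonneg k) hkr
      have hoccr : t[r.toNat]? = some '-' := (pv_occ_iff_prefix t r.toNat).mpr hpre
      have hrlen : r.toNat < t.length := by
        rcases List.getElem?_eq_some_iff.mp hoccr with ⟨h, _⟩; exact h
      have hkr' : k ≤ r.toNat := by omega
      have hcast : r + 1 = ((r.toNat + 1 : Nat) : Int) := by omega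
      rw [pvFindAllLoop, if_neg hr, hcast]
      have ihx := ih (r.toNat + 1) (by omega) (by omega) j
      rw [List.mem_cons, ihx]
      constructor
      · rintro (rfl | ⟨i, h1, rfl, h2⟩)
        · exact ⟨r.toNat, hkr', by omega, hoccr⟩
        · exact ⟨i, by omega, rfl, h2⟩
      · rintro ⟨i, h1, rfl, h2⟩
        rcases Nat.lt_trichotomy i r.toNat with hlt | heq | hgt
        · exact absurd ((pv_occ_iff_prefix t i).mp h2) (hmin i h1 hlt)
        · left; omega
        · right; exact ⟨i, by omega, rfl, h2⟩

-- B-proof-side canonical forms: a predecessor-aware scan, the split, and the rejoin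
def pvZipAux (prev : Char) (t : List Char) : List Char :=
  match t with
  | [] => []
  | c :: rest => (if c == '-' && PySem.Chars.isdigit prev then [' ', '-', ' '] else [c]) ++ pvZipAux c rest

def pvSplitDash (t : List Char) : List (List Char) :=
  match t with
  | [] => [[]]
  | c :: rest => if c = '-' then [] :: pvSplitDash rest else (pvSplitDash rest).modifyHead (c :: ·)

def pvOdig (o : Option Char) : Bool :=
  match o with
  | some c => PySem.Chars.isdigit c
  | none => false

def pvFrest (prevLast : Option Char) (ps : List (List Char)) : List Char :=
  match ps with
  | [] => []
  | p :: ps' => (if pvOdig prevLast then [' ', '-', ' '] else ['-']) ++ p ++ pvFrest p.getLast? ps'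

def pvF (acc : List Char) (parts : List (List Char)) : List Char :=
  (acc ++ parts.headD []) ++ pvFrest (acc ++ parts.headD []).getLast? parts.tail

-- A's enumerate-with-membership rebuild equals the predecessor-zip rebuild, given the
-- pointwise characterisation of the membership condition
theorem pv_joinEq (R : List Int) (sp : List Char) :
    ∀ (u : List Char) (n : Nat) (prev : Char),
    (∀ (i : Nat), i < u.length →
        (((n + i : Nat) : Int) ∈ R ↔ (u[i]? = some '-' ∧ PySem.Chars.isdigit ((prev :: u).getD i ' ') = true))) →
    (PySem.List.enumerate u (n : Int)).map (fun p => if p.1 ∈ R then sp else [p.2]) =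
    ((prev :: u).zip u).map (fun p => if p.2 == '-' && PySem.Chars.isdigit p.1 then sp else [p.2]) := by
  intro u
  induction u with
  | nil => intro n prev h; simp [PySem.List.enumerate_nil]
  | cons c u' ih =>
    intro n prev h
    rw [PySem.List.enumerate_cons, List.zip_cons_cons, List.map_cons, List.map_cons]
    have hhead : ((n : Int) ∈ R) ↔ (c == '-' && PySem.Chars.isdigit prev) = true := by
      have h0 := h 0 (by simp)
      simpa using h0
    have htail : (PySem.List.enumerate u' ((n : Int) + 1)).map (fun p => if p.1 ∈ R then sp else [p.2]) =
        ((c :: u').zip u').map (fun p => if p.2 == '-' && PySem.Chars.isdigit p.1 then sp else [p.2]) := by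
      have : ((n : Int) + 1) = ((n + 1 : Nat) : Int) := by push_cast; ring
      rw [this]
      apply ih (n + 1) c
      intro i hi
      have := h (i + 1) (by simpa using Nat.succ_lt_succ hi)
      have harith : n + 1 + i = n + (i + 1) := by omega
      rw [harith]
      simpa using this
    rw [htail]
    congr 1
    by_cases hc : (n : Int) ∈ R
    · rw [if_pos hc, if_pos (hhead.mp hc)]
    · rw [if_neg hc, if_neg (fun hb => hc (hhead.mpr hb))]

theorem pv_mem_idx_list (t : List Char) (j : Int) :
    j ∈ pvFindAllLoop (t.length + 1) t ['-'] (PySem.Chars.find t ['-']) ↔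
      ∃ i : Nat, j = (i : Int) ∧ t[i]? = some '-' := by
  have h0 : PySem.Chars.find t ['-'] = PySem.Chars.findFrom t ['-'] ((0 : Nat) : Int) none := by
    simp [PySem.Chars.findFrom_zero]
  rw [h0, pv_findAllLoop_mem t (t.length + 1) 0 (Nat.zero_le _) (by omega) j]
  simp

-- i ∈ idx_replace ↔ t[i] = '-' and its predecessor (with sentinel ' ' at i = 0) is a digit
theorem pv_pointwise (t : List Char) (i : Nat) (hi : i < t.length) :
    ((i : Int) ∈ (pvFindAllLoop (t.length + 1) t ['-'] (PySem.Chars.find t ['-'])).filter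
       (fun idx => decide (1 ≤ idx) && PySem.Chars.isdigit (PySem.List.pyGetD t (idx - 1) ' ')))
    ↔ (t[i]? = some '-' ∧ PySem.Chars.isdigit ((' ' :: t).getD i ' ') = true) := by
  rw [List.mem_filter, pv_mem_idx_list]
  cases i with
  | zero =>
    constructor
    · rintro ⟨-, hb⟩; simp at hb
    · rintro ⟨-, hb⟩
      rw [List.getD_cons_zero] at hb
      exact absurd hb (by decide)
  | succ m =>
    have hcast : ((m + 1 : Nat) : Int) - 1 = ((m : Nat) : Int) := by push_cast; ring
    constructor
    · rintro ⟨⟨i', hji, hocc⟩, hb⟩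
      have : i' = m + 1 := by exact_mod_cast hji.symm
      subst this
      refine ⟨hocc, ?_⟩
      rw [Bool.and_eq_true] at hb
      have := hb.2
      rw [hcast, PySem.List.pyGetD_natCast] at this
      simpa using this
    · rintro ⟨hocc, hb⟩
      refine ⟨⟨m + 1, rfl, hocc⟩, ?_⟩
      rw [Bool.and_eq_true]
      refine ⟨by simp, ?_⟩
      rw [hcast, PySem.List.pyGetD_natCast]
      simpa using hb

theorem pv_join_cons (x : List Char) (L : List (List Char)) :
    PySem.Chars.join [] (x :: L) = x ++ PySem.Chars.join [] L := by
  cases L with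
  | nil => simp [PySem.Chars.join, List.intercalate]
  | cons y L' => simp [PySem.Chars.join, List.intercalate, List.intersperse]

-- joining the zip-mapped pieces with '' is the predecessor-aware scan pvZipAux
theorem pv_join_zip (t : List Char) : ∀ (prev : Char),
    PySem.Chars.join []
      (((prev :: t).zip t).map (fun p => if p.2 == '-' && PySem.Chars.isdigit p.1 then [' ', '-', ' '] else [p.2])) =
    pvZipAux prev t := by
  induction t with
  | nil => intro prev; simp [pvZipAux]
  | cons c rest ih =>
    intro prev
    rw [List.zip_cons_cons, List.map_cons, pvZipAux, ← ih c, pv_join_cons]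

-- str.split never returns the empty list
theorem pv_splitDash_ne_nil (t : List Char) : pvSplitDash t ≠ [] := by
  cases t with
  | nil => simp [pvSplitDash]
  | cons c rest =>
    rw [pvSplitDash]
    split
    · simp
    · cases h : pvSplitDash rest with
      | nil => exact absurd h (pv_splitDash_ne_nil rest)
      | cons p ps => simp

-- PySem's splitOn on separator '-' is the structural recursion pvSplitDash
theorem pv_go_spec : ∀ (fuel : Nat) (l cur : List Char) (acc : List (List Char)), l.length < fuel →
    PySem.Chars.splitOn.go ['-'] fuel l cur acc =
      acc.reverse ++ (pvSplitDash l).modifyHead (cur.reverse ++ ·) := by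
  intro fuel
  induction fuel with
  | zero => intro l cur acc h; omega
  | succ f ih =>
    intro l cur acc h
    cases l with
    | nil => simp [PySem.Chars.splitOn.go.eq_def, pvSplitDash]
    | cons c rest =>
      by_cases hc : c = '-'
      · subst hc
        have hpre : List.isPrefixOf ['-'] ('-' :: rest) = true := by
          simp [List.isPrefixOf]
        rw [PySem.Chars.splitOn.go.eq_def]
        simp only [hpre, if_pos]
        rw [ih _ _ _ (by simpa using Nat.lt_of_succ_lt_succ h)]
        simp [pvSplitDash, List.modifyHead]
        cases pvSplitDash rest <;> rfl
      · have hpre : List.isPrefixOf ['-'] (c :: rest) = false := by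
          simp only [List.isPrefixOf, Bool.and_true, beq_eq_false_iff_ne, ne_eq]
          exact fun h2 => hc h2.symm
        rw [PySem.Chars.splitOn.go.eq_def]
        simp only [hpre, Bool.false_eq_true, if_false]
        rw [ih _ _ _ (by simpa using Nat.lt_of_succ_lt_succ h)]
        rw [pvSplitDash, if_neg hc]
        cases hq : pvSplitDash rest with
        | nil => exact absurd hq (pv_splitDash_ne_nil rest)
        | cons p ps => simp

theorem pv_splitOn_eq (t : List Char) : PySem.Chars.splitOn t ['-'] = pvSplitDash t := by
  rw [PySem.Chars.splitOn, pv_go_spec (t.length + 1) t [] [] (by omega)]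
  cases h : pvSplitDash t with
  | nil => exact absurd h (pv_splitDash_ne_nil t)
  | cons p ps => simp

-- the zip-of-consecutive-parts rejoin is pvFrest
theorem pv_joinParts (ps : List (List Char)) : ∀ (q : List Char),
    PySem.Chars.join []
      (((q :: ps).zip ps).map (fun p =>
        (if (match p.1.getLast? with | some c => PySem.Chars.isdigit c | none => false)
         then [' ', '-', ' '] else ['-']) ++ p.2)) =
    pvFrest q.getLast? ps := by
  induction ps with
  | nil => intro q; simp [pvFrest]
  | cons p ps' ih =>
    intro q
    rw [List.zip_cons_cons, List.map_cons, pvFrest, ← ih p, pv_join_cons]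
    simp [pvOdig]

-- main bridge: the predecessor-aware scan equals the split/rejoin, with accumulated prefix acc
theorem pv_scan_eq_split (t : List Char) : ∀ (prev : Char) (acc : List Char),
    PySem.Chars.isdigit prev = pvOdig acc.getLast? →
    acc ++ pvZipAux prev t = pvF acc (pvSplitDash t) := by
  induction t with
  | nil => intro prev acc h; simp [pvZipAux, pvSplitDash, pvF, pvFrest]
  | cons c rest ih =>
    intro prev acc h
    by_cases hc : c = '-'
    · subst hc
      have hih := ih '-' [] (by simp [pvOdig]; decide)
      rw [pvZipAux, pvSplitDash, if_pos rfl]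
      cases hq : pvSplitDash rest with
      | nil => exact absurd hq (pv_splitDash_ne_nil rest)
      | cons q qs =>
        rw [hq] at hih
        have hih' : pvZipAux '-' rest = q ++ pvFrest q.getLast? qs := by
          simpa [pvF] using hih
        simp [pvF, pvFrest, hih', h, List.append_assoc]
    · have hbeq : (c == '-') = false := by simp [hc]
      have hih := ih c (acc ++ [c]) (by simp [pvOdig])
      rw [pvZipAux, pvSplitDash, if_neg hc, hbeq]
      simp only [Bool.false_and, Bool.false_eq_true, if_false]
      cases hq : pvSplitDash rest with
      | nil => exact absurd hq (pv_splitDash_ne_nil rest)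
      | cons q qs =>
        rw [hq] at hih
        simp only [pvF, List.headD_cons, List.tail_cons, List.modifyHead_cons] at hih ⊢
        rw [← List.append_assoc, hih]
        simp

-- A's whole join expression is the predecessor-aware scan with sentinel ' '
theorem pv_A_join (t : List Char) :
    PySem.Chars.join []
      ((PySem.List.enumerate t (0 : Int)).map (fun p =>
        if p.1 ∈ (pvFindAllLoop (t.length + 1) t ['-'] (PySem.Chars.find t ['-'])).filter
            (fun idx => decide (1 ≤ idx) && PySem.Chars.isdigit (PySem.List.pyGetD t (idx - 1) ' '))
        then [' ', '-', ' '] else [p.2])) = pvZipAux ' ' t := by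
  rw [← pv_join_zip t ' ']
  apply congrArg (PySem.Chars.join [])
  have h : ∀ (i : Nat), i < t.length →
      (((0 + i : Nat) : Int) ∈ (pvFindAllLoop (t.length + 1) t ['-'] (PySem.Chars.find t ['-'])).filter
         (fun idx => decide (1 ≤ idx) && PySem.Chars.isdigit (PySem.List.pyGetD t (idx - 1) ' ')) ↔
        (t[i]? = some '-' ∧ PySem.Chars.isdigit ((' ' :: t).getD i ' ') = true)) := by
    intro i hi
    simpa using pv_pointwise t i hi
  have := pv_joinEq _ [' ', '-', ' '] t 0 ' ' h
  simpa using this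

-- ===== VERDICT (by name: the statement is the Claim_ definition above) =====
theorem clean_str_range_spec : Claim_equal_clean_str_range := by
  intro text _
  unfold Spec_clean_str_range
  simp only [clean_str_range, clean_str_range_alt]
  apply congrArg String.ofList
  rw [pv_A_join text.toList]
  have hM := pv_scan_eq_split text.toList ' ' [] (by decide)
  simp only [List.nil_append] at hM
  rw [hM, pv_splitOn_eq]
  cases hq : pvSplitDash text.toList with
  | nil => exact absurd hq (pv_splitDash_ne_nil text.toList)
  | cons p ps =>
    rw [List.headD_cons, List.tail_cons, pv_joinParts ps p]
    simp [pvF]
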